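-- pv_equiv track=rewrite | github.com/mribeiroleal-pixel/market-analyzer-pro | imbalance_analyst.py | _stacking
-- ===== SOURCE A (Python) =====
-- from typing import Any, Dict, List, Optional
--
-- def _stacking(imbs: List[Dict[str, Any]], sorted_lvs: List[int]) -> int:
--     if not imbs:
--         return 0
--     imb_set = {i["level"] for i in imbs}
--     cur = mx = 0
--     for lv in sorted_lvs:
--         if lv in imb_set:
--             cur += 1; mx = max(mx, cur)
--         else:
--             cur = 0
--     return mx
-- ===== SOURCE B (Python) =====
-- def _stacking(imbs, sorted_lvs):
--     levels = {d["level"] for d in imbs}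
--     misses = [-1] + [i for i, lv in enumerate(sorted_lvs) if lv not in levels] + [len(sorted_lvs)]
--     return max(b - a - 1 for a, b in zip(misses, misses[1:]))
-- ===== Notes on version B (the rewrite author's own statement) =====
-- stated objective: alternative
-- what changed: Instead of A's single pass with running (cur, mx) counters, B stages the computation: it collects the positions of the levels NOT in the imbalance set (with sentinels -1 and len), then returns the maximum gap between consecutive such positions, which also makes A's empty-imbs early return unnecessary.
import Mathlib
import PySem

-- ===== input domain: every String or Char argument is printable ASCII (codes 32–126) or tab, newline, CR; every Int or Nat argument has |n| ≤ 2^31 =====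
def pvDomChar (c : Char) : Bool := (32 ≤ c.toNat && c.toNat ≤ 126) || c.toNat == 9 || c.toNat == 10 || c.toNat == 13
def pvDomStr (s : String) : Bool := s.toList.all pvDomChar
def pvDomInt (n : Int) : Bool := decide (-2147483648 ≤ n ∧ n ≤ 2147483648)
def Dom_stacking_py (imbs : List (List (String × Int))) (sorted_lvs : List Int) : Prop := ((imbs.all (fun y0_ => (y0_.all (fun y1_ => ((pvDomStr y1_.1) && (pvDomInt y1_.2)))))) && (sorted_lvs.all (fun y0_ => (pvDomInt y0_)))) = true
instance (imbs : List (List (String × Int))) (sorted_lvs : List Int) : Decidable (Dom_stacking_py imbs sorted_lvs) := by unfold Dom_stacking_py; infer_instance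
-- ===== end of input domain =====

-- B replaces A's running-counter scan by a staged computation: collect the positions of the
-- NON-imbalance levels (with sentinels -1 and len) and return the largest gap between two
-- consecutive such positions; alternative decomposition, no speed claim.

-- ===== PORT A =====
-- shared helper: the set comprehension {i["level"] for i in imbs}, identical in both Pythons.
-- d["level"] is first-match lookup in the association list; under Pre_ every dict has the key,
-- so the `.getD 0` default (Python's KeyError) is never taken.
def pvLevels (imbs : List (List (String × Int))) : PySem.Set Int :=
  PySem.Set.ofList (imbs.map (fun d => ((d.find? (fun p => p.1 == "level")).map Prod.snd).getD 0))

def stacking_py (imbs : List (List (String × Int))) (sorted_lvs : List Int) : Int :=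
  if imbs = [] then 0
  else
    (sorted_lvs.foldl
      (fun (cm : Int × Int) lv =>
        if PySem.Set.contains (pvLevels imbs) lv then (cm.1 + 1, max cm.2 (cm.1 + 1))
        else (0, cm.2))
      (0, 0)).2

-- ===== PORT B =====
-- misses = [-1] + [i for i, lv in enumerate(sorted_lvs) if lv not in levels] + [len(sorted_lvs)];
-- max(b - a - 1 for a, b in zip(misses, misses[1:])): the zipped list is never empty (misses has
-- ≥ 2 elements), so Python's ValueError on max() of an empty generator — the `.getD 0` — is unreachable.
def stacking_py_alt (imbs : List (List (String × Int))) (sorted_lvs : List Int) : Int :=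
  let misses : List Int :=
    [-1] ++ ((PySem.List.enumerate sorted_lvs 0).filter
        (fun p => ! PySem.Set.contains (pvLevels imbs) p.2)).map (fun p => p.1)
      ++ [(sorted_lvs.length : Int)]
  (PySem.List.max? ((misses.zip misses.tail).map (fun ab => ab.2 - ab.1 - 1)) (fun x => x)).getD 0

-- ===== PRECONDITION & SPEC =====
-- Pre_ excludes exactly the inputs where Python raises KeyError: a non-empty imbs containing a dict without the "level" key.
def Pre_stacking_py (imbs : List (List (String × Int))) (sorted_lvs : List Int) : Prop :=
  imbs.all (fun d => d.any (fun p => p.1 == "level")) = true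

instance (imbs : List (List (String × Int))) (sorted_lvs : List Int) : Decidable (Pre_stacking_py imbs sorted_lvs) := by unfold Pre_stacking_py; infer_instance

def pvWitness_stacking_py : (List (List (String × Int))) × List Int :=
  ([[("level", 3)], [("level", 4)]], [2, 3, 4, 6])

def Spec_stacking_py (imbs : List (List (String × Int))) (sorted_lvs : List Int) (out : Int) : Prop :=
  out = stacking_py_alt imbs sorted_lvs

instance (imbs : List (List (String × Int))) (sorted_lvs : List Int) (out : Int) : Decidable (Spec_stacking_py imbs sorted_lvs out) := by unfold Spec_stacking_py; infer_instance

-- ===== CLAIM =====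
def Claim_equal_stacking_py : Prop := ∀ (imbs : List (List (String × Int))) (sorted_lvs : List Int), Dom_stacking_py imbs sorted_lvs → Pre_stacking_py imbs sorted_lvs → Spec_stacking_py imbs sorted_lvs (stacking_py imbs sorted_lvs)

-- ===== LEMMAS AND PROOFS =====

-- positions (from offset s) of the elements NOT in the set
def pvMissIdx (f : Int → Bool) : List Int → Int → List Int
  | [], _ => []
  | x :: t, s => if f x then pvMissIdx f t (s + 1) else s :: pvMissIdx f t (s + 1)

-- gaps between consecutive entries of (a :: ms ++ [n])
def pvGaps : Int → List Int → Int → List Int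
  | a, [], n => [n - a - 1]
  | a, b :: bs, n => (b - a - 1) :: pvGaps b bs n

lemma pv_missIdx_eq (f : Int → Bool) : ∀ (lvs : List Int) (s : Int),
    ((PySem.List.enumerate lvs s).filter (fun p => ! f p.2)).map (fun p => p.1)
      = pvMissIdx f lvs s := by
  intro lvs
  induction lvs with
  | nil => intro s; simp [pvMissIdx, PySem.List.enumerate_nil]
  | cons x t ih =>
    intro s
    rw [PySem.List.enumerate_cons]
    cases hf : f x <;> simp [pvMissIdx, hf, ih]

lemma pv_zip_gaps : ∀ (ms : List Int) (a n : Int),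
    (((a :: (ms ++ [n])).zip (ms ++ [n])).map (fun ab => ab.2 - ab.1 - 1)) = pvGaps a ms n := by
  intro ms
  induction ms with
  | nil => intro a n; simp [pvGaps]
  | cons b bs ih => intro a n; simp [pvGaps, ih b n]

lemma pv_foldl_max_max (l : List Int) : ∀ (a c : Int),
    l.foldl max (max a c) = max (l.foldl max a) c := by
  induction l with
  | nil => intro a c; rfl
  | cons x t ih =>
    intro a c
    simp only [List.foldl_cons]
    rw [max_right_comm a c x, ih (max a x) c]

lemma pv_missIdx_lb (f : Int → Bool) : ∀ (lvs : List Int) (s : Int),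
    ∀ x ∈ pvMissIdx f lvs s, s ≤ x := by
  intro lvs
  induction lvs with
  | nil => intro s x hx; simp [pvMissIdx] at hx
  | cons y t ih =>
    intro s x hx
    unfold pvMissIdx at hx
    cases hf : f y <;> rw [hf] at hx
    · simp at hx
      rcases hx with h | h
      · omega
      · have := ih (s + 1) x h; omega
    · simp at hx
      have := ih (s + 1) x hx; omega

-- a lower bound on the running max over the gaps list
lemma pv_gaps_lb (mx a q n : Int) (ms : List Int)
    (h : ∀ x ∈ ms, q ≤ x) (hn : q ≤ n) :
    q - a - 1 ≤ (pvGaps a ms n).foldl max mx := by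
  cases ms with
  | nil =>
    simp only [pvGaps, List.foldl_cons, List.foldl_nil]
    have := le_max_right mx (n - a - 1)
    omega
  | cons b bs =>
    simp only [pvGaps, List.foldl_cons]
    have h1 : max mx (b - a - 1) ≤ (pvGaps b bs n).foldl max (max mx (b - a - 1)) :=
      (PySem.List.le_foldl_max _ _).1
    have h2 : q ≤ b := h b (by simp)
    have := le_max_right mx (b - a - 1)
    omega

-- main invariant: A's fold from state (p - lastm - 1, mx) computes the max-gap fold of B
lemma pv_main (f : Int → Bool) : ∀ (lvs : List Int) (p lastm mx : Int),
    lastm < p → p - lastm - 1 ≤ mx →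
    (lvs.foldl
        (fun (cm : Int × Int) lv =>
          if f lv then (cm.1 + 1, max cm.2 (cm.1 + 1)) else (0, cm.2))
        (p - lastm - 1, mx)).2
      = (pvGaps lastm (pvMissIdx f lvs p) (p + lvs.length)).foldl max mx := by
  intro lvs
  induction lvs with
  | nil =>
    intro p lastm mx h1 h2
    simp only [List.foldl_nil, pvMissIdx, pvGaps, List.length_nil, Nat.cast_zero, add_zero,
      List.foldl_cons]
    omega
  | cons x t ih =>
    intro p lastm mx h1 h2
    simp only [List.foldl_cons, pvMissIdx, List.length_cons]
    cases hf : f x with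
    | true =>
      simp only [if_true]
      have hstate : (p - lastm - 1 + 1, max mx (p - lastm - 1 + 1))
          = ((p + 1) - lastm - 1, max mx ((p + 1) - lastm - 1)) := by
        congr 1 <;> omega
      rw [hstate, ih (p + 1) lastm (max mx ((p + 1) - lastm - 1)) (by omega) (le_max_right _ _)]
      rw [pv_foldl_max_max]
      push_cast
      have hlen : p + ((t.length : Int) + 1) = (p + 1) + (t.length : Int) := by ring
      rw [hlen]
      have hlb : (p + 1) - lastm - 1 ≤
          (pvGaps lastm (pvMissIdx f t (p + 1)) ((p + 1) + (t.length : Int))).foldl max mx :=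
        pv_gaps_lb mx lastm (p + 1) _ _ (pv_missIdx_lb f t (p + 1))
          (by have := Int.natCast_nonneg t.length; omega)
      omega
    | false =>
      simp only [if_false, Bool.false_eq_true]
      have h := ih (p + 1) p mx (by omega) (by omega)
      simp only [show (p + 1) - p - 1 = (0 : Int) by omega] at h
      rw [h]
      simp only [pvGaps, List.foldl_cons]
      have hmx : max mx (p - lastm - 1) = mx := by omega
      push_cast
      have hlen : p + ((t.length : Int) + 1) = (p + 1) + (t.length : Int) := by ring
      rw [hmx, hlen]

-- when nothing is in the set, A's mx stays put.
lemma pv_fold_false (f : Int → Bool) (lvs : List Int) : ∀ (c m : Int),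
    (∀ lv ∈ lvs, f lv = false) →
    (lvs.foldl (fun (cm : Int × Int) lv => if f lv then (cm.1 + 1, max cm.2 (cm.1 + 1)) else (0, cm.2)) (c, m)).2 = m := by
  induction lvs with
  | nil => intro c m _; rfl
  | cons lv t ih =>
    intro c m h
    simp only [List.foldl_cons, h lv (by simp), if_false, Bool.false_eq_true]
    exact ih 0 m (fun x hx => h x (by simp [hx]))

-- B's value, rewritten through pvGaps, equals the fold of A's step from (0,0)
lemma pv_gapsmax (f : Int → Bool) (lvs : List Int) :
    (PySem.List.max? (pvGaps (-1) (pvMissIdx f lvs 0) (lvs.length : Int)) (fun x => x)).getD 0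
      = (lvs.foldl
          (fun (cm : Int × Int) lv => if f lv then (cm.1 + 1, max cm.2 (cm.1 + 1)) else (0, cm.2))
          (0, 0)).2 := by
  have hmain := pv_main f lvs 0 (-1) 0 (by omega) (by omega)
  norm_num at hmain
  rw [hmain]
  cases hms : pvMissIdx f lvs 0 with
  | nil =>
    simp only [pvGaps, PySem.List.max?_id_cons, Option.getD_some, List.foldl_nil, List.foldl_cons]
    have := Int.natCast_nonneg lvs.length
    omega
  | cons b bs =>
    have hb : (0 : Int) ≤ b := pv_missIdx_lb f lvs 0 b (by rw [hms]; simp)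
    simp only [pvGaps, PySem.List.max?_id_cons, Option.getD_some, List.foldl_cons]
    have hmax : max 0 (b - (-1) - 1) = b - (-1) - 1 := by omega
    rw [hmax]

lemma pv_alt_eq_fold (imbs : List (List (String × Int))) (lvs : List Int) :
    stacking_py_alt imbs lvs
      = (lvs.foldl
          (fun (cm : Int × Int) lv =>
            if PySem.Set.contains (pvLevels imbs) lv then (cm.1 + 1, max cm.2 (cm.1 + 1))
            else (0, cm.2))
          (0, 0)).2 := by
  unfold stacking_py_alt
  rw [pv_missIdx_eq (fun lv => PySem.Set.contains (pvLevels imbs) lv) lvs 0]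
  have hL : (([-1] : List Int)
        ++ pvMissIdx (fun lv => PySem.Set.contains (pvLevels imbs) lv) lvs 0
        ++ [(lvs.length : Int)])
      = (-1 : Int) :: (pvMissIdx (fun lv => PySem.Set.contains (pvLevels imbs) lv) lvs 0
        ++ [(lvs.length : Int)]) := by simp
  rw [hL]
  show (PySem.List.max?
      (List.map (fun ab => ab.2 - ab.1 - 1)
        (((-1 : Int) :: (pvMissIdx (fun lv => PySem.Set.contains (pvLevels imbs) lv) lvs 0
            ++ [(lvs.length : Int)])).zip
          ((-1 : Int) :: (pvMissIdx (fun lv => PySem.Set.contains (pvLevels imbs) lv) lvs 0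
            ++ [(lvs.length : Int)])).tail))
      (fun x => x)).getD 0 = _
  rw [List.tail_cons, pv_zip_gaps _ (-1) (lvs.length : Int)]
  exact pv_gapsmax (fun lv => PySem.Set.contains (pvLevels imbs) lv) lvs

-- ===== VERDICT =====
theorem stacking_py_spec : Claim_equal_stacking_py := by
  intro imbs sorted_lvs _dom _pre
  unfold Spec_stacking_py stacking_py
  rw [pv_alt_eq_fold]
  by_cases himbs : imbs = []
  · rw [if_pos himbs]
    subst himbs
    refine (pv_fold_false _ sorted_lvs 0 0 (fun lv _ => ?_)).symm
    rfl
  · rw [if_neg himbs]
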